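-- pv_equiv track=rewrite | github.com/RajkumarR2006/AI-VERSE-MYTHICAL-MAVERICKS | gema-rag/src/code_mixing_handler.py | detect_code_mixing
-- ===== SOURCE A (Python) =====
-- HINDI_STOPWORDS = {'ka', 'ki', 'ke', 'hai', 'hain', 'ko', 'se', 'me', 'par', 'kya', 'kitna', 'kaise', 'kab', 'kahan', 'kyon'}
--
-- TAMIL_STOPWORDS = {'enna', 'yenna', 'eppadi', 'eppo', 'enga', 'ethana', 'antha', 'intha', 'da', 'na', 'illa'}
--
-- TELUGU_STOPWORDS = {'emi', 'ela', 'eppudu', 'ekkada', 'enta', 'aa', 'ee', 'lo', 'ki', 'ni', 'ledu'}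
--
-- def detect_code_mixing(query):
--     """Detect code-mixing"""
--     words = query.lower().split()
--
--     hindi_count = sum(1 for w in words if w in HINDI_STOPWORDS)
--     tamil_count = sum(1 for w in words if w in TAMIL_STOPWORDS)
--     telugu_count = sum(1 for w in words if w in TELUGU_STOPWORDS)
--
--     if hindi_count > 0:
--         return True, 'hi'
--     elif tamil_count > 0:
--         return True, 'ta'
--     elif telugu_count > 0:
--         return True, 'te'
--
--     return False, 'en'
-- ===== SOURCE B (Python) =====
-- HINDI_STOPWORDS = {'ka', 'ki', 'ke', 'hai', 'hain', 'ko', 'se', 'me', 'par', 'kya', 'kitna', 'kaise', 'kab', 'kahan', 'kyon'}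
--
-- TAMIL_STOPWORDS = {'enna', 'yenna', 'eppadi', 'eppo', 'enga', 'ethana', 'antha', 'intha', 'da', 'na', 'illa'}
--
-- TELUGU_STOPWORDS = {'emi', 'ela', 'eppudu', 'ekkada', 'enta', 'aa', 'ee', 'lo', 'ki', 'ni', 'ledu'}
--
-- def detect_code_mixing(query):
--     """Detect code-mixing (single pass over the words)"""
--     saw_hi = saw_ta = saw_te = False
--     for w in query.lower().split():
--         saw_hi = saw_hi or w in HINDI_STOPWORDS
--         saw_ta = saw_ta or w in TAMIL_STOPWORDS
--         saw_te = saw_te or w in TELUGU_STOPWORDS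
--     if saw_hi:
--         return True, 'hi'
--     elif saw_ta:
--         return True, 'ta'
--     elif saw_te:
--         return True, 'te'
--     return False, 'en'
-- ===== Notes on version B (the rewrite author's own statement) =====
-- stated objective: alternative
-- what changed: Replaces three full comprehension-sum scans of the word list (one per language) with a single pass maintaining three booleans, then applies the same hi > ta > te priority.
import Mathlib
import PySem

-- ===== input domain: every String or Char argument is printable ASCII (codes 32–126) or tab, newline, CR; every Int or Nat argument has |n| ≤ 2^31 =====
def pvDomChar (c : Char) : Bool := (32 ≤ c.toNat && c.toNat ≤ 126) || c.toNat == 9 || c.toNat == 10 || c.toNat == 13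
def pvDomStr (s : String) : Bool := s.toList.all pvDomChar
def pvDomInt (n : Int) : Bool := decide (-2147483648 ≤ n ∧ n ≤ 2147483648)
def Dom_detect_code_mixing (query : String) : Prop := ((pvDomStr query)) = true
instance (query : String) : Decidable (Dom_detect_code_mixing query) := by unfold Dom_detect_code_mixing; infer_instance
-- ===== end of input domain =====

-- B replaces A's three comprehension-sum scans of the word list by one fold carrying three booleans; same priority order.

-- ===== PORT A =====
def HINDI_STOPWORDS : PySem.Set String := PySem.Set.ofList
  ["ka", "ki", "ke", "hai", "hain", "ko", "se", "me", "par", "kya", "kitna", "kaise", "kab", "kahan", "kyon"]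
def TAMIL_STOPWORDS : PySem.Set String := PySem.Set.ofList
  ["enna", "yenna", "eppadi", "eppo", "enga", "ethana", "antha", "intha", "da", "na", "illa"]
def TELUGU_STOPWORDS : PySem.Set String := PySem.Set.ofList
  ["emi", "ela", "eppudu", "ekkada", "enta", "aa", "ee", "lo", "ki", "ni", "ledu"]

def detect_code_mixing (query : String) : Bool × String :=
  let words := PySem.Str.split₀ (PySem.Str.lower query)
  let hindi_count : Int := (words.map (fun w => if PySem.Set.contains HINDI_STOPWORDS w then (1 : Int) else 0)).sum
  let tamil_count : Int := (words.map (fun w => if PySem.Set.contains TAMIL_STOPWORDS w then (1 : Int) else 0)).sum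
  let telugu_count : Int := (words.map (fun w => if PySem.Set.contains TELUGU_STOPWORDS w then (1 : Int) else 0)).sum
  if hindi_count > 0 then (true, "hi")
  else if tamil_count > 0 then (true, "ta")
  else if telugu_count > 0 then (true, "te")
  else (false, "en")

-- ===== PORT B =====
def detect_code_mixing_alt (query : String) : Bool × String :=
  let st := (PySem.Str.split₀ (PySem.Str.lower query)).foldl
    (fun (s : Bool × Bool × Bool) w =>
      (s.1 || PySem.Set.contains HINDI_STOPWORDS w,
       s.2.1 || PySem.Set.contains TAMIL_STOPWORDS w,
       s.2.2 || PySem.Set.contains TELUGU_STOPWORDS w))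
    (false, false, false)
  if st.1 then (true, "hi")
  else if st.2.1 then (true, "ta")
  else if st.2.2 then (true, "te")
  else (false, "en")

-- ===== PRECONDITION & SPEC =====
def Spec_detect_code_mixing (query : String) (out : Bool × String) : Prop := out = detect_code_mixing_alt query
instance (query : String) (out : Bool × String) : Decidable (Spec_detect_code_mixing query out) := by unfold Spec_detect_code_mixing; infer_instance

-- ===== CLAIM (what is proved, stated in full; the proofs are below) =====
def Claim_equal_detect_code_mixing : Prop := ∀ (query : String), Dom_detect_code_mixing query → Spec_detect_code_mixing query (detect_code_mixing query)

-- ===== LEMMAS AND PROOFS =====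

-- A's 0/1 comprehension-sum is positive iff some word satisfies the predicate.
theorem pv_sum_pos_iff_any (p : String → Bool) (ws : List String) :
    ((ws.map (fun w => if p w then (1 : Int) else 0)).sum > 0) ↔ ws.any p = true := by
  induction ws with
  | nil => simp
  | cons x xs ih =>
    have h0 : (0 : Int) ≤ (xs.map (fun w => if p w then (1 : Int) else 0)).sum := by
      apply List.sum_nonneg; intro a ha
      simp only [List.mem_map] at ha
      obtain ⟨w, _, rfl⟩ := ha
      split <;> omega
    by_cases hx : p x = true <;> simp [hx, ih] <;> try omega

-- B's fold computes the three 'any' flags.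
theorem pv_fold_eq_any (pH pT pE : String → Bool) (ws : List String) (h t e : Bool) :
    ws.foldl (fun (s : Bool × Bool × Bool) w =>
      (s.1 || pH w, s.2.1 || pT w, s.2.2 || pE w)) (h, t, e)
    = (h || ws.any pH, t || ws.any pT, e || ws.any pE) := by
  induction ws generalizing h t e with
  | nil => simp
  | cons x xs ih => simp [List.foldl_cons, ih, Bool.or_assoc]

-- ===== VERDICT (by name: the statement is the Claim_ definition above) =====
theorem detect_code_mixing_spec : Claim_equal_detect_code_mixing := by
  intro query _
  unfold Spec_detect_code_mixing detect_code_mixing detect_code_mixing_alt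
  rw [pv_fold_eq_any]
  simp only [Bool.false_or, pv_sum_pos_iff_any]
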